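-- pv_equiv track=rewrite | github.com/ychangseok/PS-template | template.py | mabangjin_check
-- ===== SOURCE A (Python) =====
-- def mabangjin_check(ans):
--     tmp = []
--     n = len(ans)
--     for i in range(n):
--         tmp.append(sum(ans[i]))
--
--     for i in range(n):
--         s = 0
--         for j in range(n):
--             s += ans[j][i]
--         tmp.append(s)
--
--     s = 0
--     for i in range(n):
--         s += ans[i][i]
--     tmp.append(s)
--
--     s = 0
--     for i in range(n):
--         s += ans[n - 1 - i][i]
--     tmp.append(s)
--
--     return len(list(set(tmp)))
-- ===== SOURCE B (Python) =====
-- def mabangjin_check(ans):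
--     n = len(ans)
--     sums = [sum(r) for r in ans]
--     sums += [sum(c) for c in list(zip(*ans))[:n]]
--     sums.append(sum(r[i] for i, r in enumerate(ans)))
--     sums.append(sum(r[n - 1 - i] for i, r in enumerate(ans)))
--     sums.sort()
--     return 1 + sum(1 for a, b in zip(sums, sums[1:]) if a != b)
-- ===== Notes on version B (the rewrite author's own statement) =====
-- stated objective: alternative
-- what changed: B materialises the transposed matrix with zip(*ans) to get column sums, reads the diagonals by enumerate, and counts distinct sums by sorting the list once and counting adjacent unequal pairs instead of A's nested index loops and hash-set deduplication.
import Mathlib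
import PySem

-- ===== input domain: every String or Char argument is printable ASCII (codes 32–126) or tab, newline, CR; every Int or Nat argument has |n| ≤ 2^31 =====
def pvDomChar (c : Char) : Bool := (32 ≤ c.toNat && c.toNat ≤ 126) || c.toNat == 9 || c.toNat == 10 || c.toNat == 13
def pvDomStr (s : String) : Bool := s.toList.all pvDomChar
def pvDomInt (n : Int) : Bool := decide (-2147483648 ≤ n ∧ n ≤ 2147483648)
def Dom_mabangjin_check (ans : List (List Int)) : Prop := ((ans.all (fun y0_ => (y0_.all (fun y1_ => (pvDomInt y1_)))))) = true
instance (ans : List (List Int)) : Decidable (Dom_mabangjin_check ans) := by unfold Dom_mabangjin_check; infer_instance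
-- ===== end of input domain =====

-- B gets column sums from the transposed matrix (zip(*ans)), diagonals via enumerate, and
-- counts distinct sums by sorting once and counting adjacent unequal pairs instead of A's
-- nested index loops and set() deduplication (objective: alternative; same asymptotic cost).

-- ===== PORT A =====
def mabangjin_check (ans : List (List Int)) : Int :=
  let n : Int := (ans.length : Int)
  let tmp1 : List Int := (PySem.List.pyRange 0 n 1).foldl
    (fun acc i => acc ++ [(PySem.List.pyGetD ans i []).sum]) []
  let tmp2 : List Int := (PySem.List.pyRange 0 n 1).foldl
    (fun acc i => acc ++ [(PySem.List.pyRange 0 n 1).foldl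
        (fun s j => s + PySem.List.pyGetD (PySem.List.pyGetD ans j []) i 0) 0]) tmp1
  let d1 : Int := (PySem.List.pyRange 0 n 1).foldl
    (fun s i => s + PySem.List.pyGetD (PySem.List.pyGetD ans i []) i 0) 0
  let d2 : Int := (PySem.List.pyRange 0 n 1).foldl
    (fun s i => s + PySem.List.pyGetD (PySem.List.pyGetD ans (n - 1 - i) []) i 0) 0
  ((PySem.Set.ofList (tmp2 ++ [d1] ++ [d2])).length : Int)

-- ===== PORT B =====
-- Python's zip(*l): columns up to the shortest row (hand-ported; PySem has no n-ary zip)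
def pvZipStar (l : List (List Int)) : List (List Int) :=
  if h : l = [] ∨ l.any (·.isEmpty) then []
  else (l.map (fun r => r.headD 0)) :: pvZipStar (l.map List.tail)
termination_by (l.headD []).length
decreasing_by
  rcases l with _ | ⟨a, t⟩
  · exact absurd (Or.inl rfl) h
  · simp only [List.headD_cons]
    rcases a with _ | ⟨x, xs⟩
    · exact absurd (Or.inr (by simp)) h
    · simp

def mabangjin_check_alt (ans : List (List Int)) : Int :=
  let n := ans.length
  let sums1 : List Int := ans.map List.sum
  let sums2 : List Int := sums1 ++ ((pvZipStar ans).take n).map List.sum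
  let sums3 : List Int := sums2 ++
    [((PySem.List.enumerate ans 0).map (fun p => PySem.List.pyGetD p.2 p.1 0)).sum]
  let sums4 : List Int := sums3 ++
    [((PySem.List.enumerate ans 0).map
        (fun p => PySem.List.pyGetD p.2 ((n : Int) - 1 - p.1) 0)).sum]
  let s := PySem.List.sorted sums4 (fun x => x) false
  1 + (((List.zip s (PySem.List.slice s (some 1) none)).countP (fun p => p.1 != p.2) : Nat) : Int)

-- ===== PRECONDITION & SPEC =====
-- Pre_ excludes exactly the ragged inputs (some row shorter than the number of rows)
-- on which A raises IndexError in its column/diagonal loops.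
def Pre_mabangjin_check (ans : List (List Int)) : Prop :=
  ∀ row ∈ ans, ans.length ≤ row.length
instance (ans : List (List Int)) : Decidable (Pre_mabangjin_check ans) := by
  unfold Pre_mabangjin_check; infer_instance

def pvWitness_mabangjin_check : List (List Int) := [[2, 7, 6], [9, 5, 1], [4, 3, 8]]

def Spec_mabangjin_check (ans : List (List Int)) (out : Int) : Prop := out = mabangjin_check_alt ans
instance (ans : List (List Int)) (out : Int) : Decidable (Spec_mabangjin_check ans out) := by unfold Spec_mabangjin_check; infer_instance

-- ===== CLAIM (what is proved, stated in full; the proofs are below) =====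
def Claim_equal_mabangjin_check : Prop := ∀ (ans : List (List Int)), Dom_mabangjin_check ans → Pre_mabangjin_check ans → Spec_mabangjin_check ans (mabangjin_check ans)

-- ===== LEMMAS AND PROOFS =====

-- (range l.length).map (fun i => f (l.getD i d)) = l.map f
theorem map_getD_range_comp {α β : Type} (l : List α) (d : α) (f : α → β) :
    (List.range l.length).map (fun i => f (l.getD i d)) = l.map f := by
  apply List.ext_getElem
  · simp
  · intro i h1 h2
    have hi : i < l.length := by simpa using h2
    simp [List.getD, List.getElem?_eq_getElem hi]

-- the first n columns produced by pvZipStar, when every row has at least n entries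
theorem zipStar_take (n : Nat) (l : List (List Int)) (hne : l ≠ [])
    (h : ∀ r ∈ l, n ≤ r.length) :
    (pvZipStar l).take n = (List.range n).map (fun j => l.map (fun r => r.getD j 0)) := by
  induction n generalizing l with
  | zero => simp
  | succ m ih =>
    have hnoempty : ¬(l = [] ∨ l.any (·.isEmpty)) := by
      rintro (rfl | hany)
      · exact hne rfl
      · rcases List.any_eq_true.mp hany with ⟨r, hr, he⟩
        have := h r hr
        cases r <;> simp_all
    rw [pvZipStar, dif_neg hnoempty, List.take_succ_cons,
      ih (l.map List.tail) (by simpa using hne)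
        (by intro r' hr'; rcases List.mem_map.mp hr' with ⟨r, hr, rfl⟩
            have := h r hr; simp; omega),
      List.range_succ_eq_map]
    simp only [List.map_cons, List.map_map, Function.comp_def]
    congr 1
    · exact List.map_congr_left (fun r _ => by cases r <;> simp [List.getD])
    · exact List.map_congr_left (fun j _ => List.map_congr_left
        (fun r _ => by simp [List.getD, List.getElem?_tail]))

-- adjacent-unequal count of a weakly increasing list, plus one, is its number of distinct values
theorem chain_count (s : List Int) (hp : s.Pairwise (· ≤ ·)) (hne : s ≠ []) :
    (List.zip s s.tail).countP (fun p => p.1 != p.2) + 1 = s.toFinset.card := by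
  induction s with
  | nil => exact absurd rfl hne
  | cons a t ih =>
    cases t with
    | nil => simp
    | cons b t' =>
      have hp' : (b :: t').Pairwise (· ≤ ·) := hp.of_cons
      have hab : a ≤ b := (List.pairwise_cons.mp hp).1 b (by simp)
      simp only [List.tail_cons] at ih
      simp only [List.tail_cons, List.zip_cons_cons, List.countP_cons]
      by_cases h : a = b
      · subst h
        simp only [bne_self_eq_false, Bool.false_eq_true, if_false, Nat.add_zero]
        rw [ih hp' (by simp)]
        simp [List.toFinset_cons]
      · have hnm : a ∉ (b :: t').toFinset := by
          simp only [List.mem_toFinset, List.mem_cons]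
          rintro (rfl | hx)
          · exact h rfl
          · have hbx : b ≤ _ := (List.pairwise_cons.mp hp').1 a hx
            omega
        have hd : (a != b) = true := bne_iff_ne.mpr h
        simp only [hd, if_true]
        rw [List.toFinset_cons, Finset.card_insert_of_notMem hnm, ← ih hp' (by simp)]

-- len(set(L)) equals one plus the adjacent-unequal count of sorted(L)
theorem distinct_count (L : List Int) (hne : L ≠ []) :
    ((PySem.Set.ofList L).length : Int) =
      1 + (((List.zip (PySem.List.sorted L (fun x => x) false)
              (PySem.List.sorted L (fun x => x) false).tail).countP
              (fun p => p.1 != p.2) : Nat) : Int) := by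
  set s := PySem.List.sorted L (fun x => x) false with hs
  have hperm : s.Perm L := PySem.List.sorted_perm L (fun x => x) false
  have hp : s.Pairwise (· ≤ ·) := by
    have := PySem.List.sorted_pairwise L (fun x => x)
    simpa using this
  have hsne : s ≠ [] := by
    rw [hs, Ne, PySem.List.sorted_eq_nil_iff]; exact hne
  have h1 : (PySem.Set.ofList L).toFinset = L.toFinset := by
    ext x; simp [PySem.Set.mem_ofList]
  have h2 : (PySem.Set.ofList L).length = L.toFinset.card := by
    rw [← List.toFinset_card_of_nodup (PySem.Set.nodup_ofList L), h1]
  rw [h2, ← List.toFinset_eq_of_perm s L hperm, ← chain_count s hp hsne]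
  push_cast
  ring

-- reflect a sum over range: sum of f (m-1-k) equals sum of f k
theorem sum_map_range_reflect (f : Nat → Int) (m : Nat) :
    ((List.range m).map (fun k => f (m - 1 - k))).sum = ((List.range m).map f).sum := by
  have h1 : ((List.range m).map (fun k => f (m - 1 - k))).sum = ∑ i ∈ Finset.range m, f (m - 1 - i) := rfl
  have h2 : ((List.range m).map f).sum = ∑ i ∈ Finset.range m, f i := rfl
  rw [h1, h2]
  exact Finset.sum_range_reflect f m

-- ===== VERDICT (by name: the statement is the Claim_ definition above) =====
theorem mabangjin_check_spec : Claim_equal_mabangjin_check := by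
  intro ans _ hpre
  unfold Spec_mabangjin_check mabangjin_check mabangjin_check_alt
  rcases eq_or_ne ans [] with rfl | hne
  · decide
  · dsimp only
    rw [PySem.List.slice_from_one, zipStar_take ans.length ans hne hpre,
      PySem.List.enumerate_eq_map_pyRange ans ([] : List Int)]
    simp only [PySem.List.len, PySem.List.pyRange_zero_natCast,
      PySem.List.foldl_append_singleton_eq_map, PySem.List.foldl_add, List.map_map,
      Function.comp_def, PySem.List.pyGetD_natCast, List.nil_append, List.append_assoc,
      List.cons_append, Int.zero_add]
    have hcol : (List.range ans.length).map
          (fun x => ((List.range ans.length).map (fun j => (ans.getD j []).getD x 0)).sum)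
        = (List.range ans.length).map
          (fun x => (ans.map (fun r => r.getD x 0)).sum) := by
      apply List.map_congr_left
      intro i _
      rw [map_getD_range_comp ans ([] : List Int) (fun r => r.getD i 0)]
    have hsub : ∀ i : Nat, i < ans.length →
        ((ans.length : Int) - 1 - (i : Int)) = ((ans.length - 1 - i : Nat) : Int) := by
      intro i hi
      omega
    have hA : (List.range ans.length).map
          (fun (x : Nat) => (PySem.List.pyGetD ans ((ans.length : Int) - 1 - (x : Int)) []).getD x 0)
        = (List.range ans.length).map
          (fun x => (fun k => (ans.getD k []).getD (ans.length - 1 - k) 0) (ans.length - 1 - x)) := by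
      apply List.map_congr_left
      intro i hi
      simp only [List.mem_range] at hi
      rw [hsub i hi, PySem.List.pyGetD_natCast]
      congr 1
      omega
    have hB : (List.range ans.length).map
          (fun (k : Nat) => PySem.List.pyGetD (ans.getD k []) ((ans.length : Int) - 1 - (k : Int)) 0)
        = (List.range ans.length).map
          (fun k => (ans.getD k []).getD (ans.length - 1 - k) 0) := by
      apply List.map_congr_left
      intro k hk
      simp only [List.mem_range] at hk
      rw [hsub k hk, PySem.List.pyGetD_natCast]
    rw [map_getD_range_comp ans ([] : List Int) List.sum, hcol, hA, hB,
      sum_map_range_reflect (fun k => (ans.getD k []).getD (ans.length - 1 - k) 0) ans.length]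
    exact distinct_count _ (by simp)
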